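-- pv_equiv track=rewrite | github.com/MilanaT21/-2 | задание 2_5.py | sum_0
-- ===== SOURCE A (Python) =====
-- def sum_0(numbers):
--     last_index = -1
--     last_index_2 = -1
--
--     for i in range(len(numbers)):
--         if numbers[i] == 0:
--             last_index_2 = last_index
--             last_index = i
--     if last_index - last_index_2 == 1:
--         return 0
--     if last_index != -1 and last_index_2 != -1:
--         return sum(numbers[last_index_2 + 1:last_index])
--     return 0
-- ===== SOURCE B (Python) =====
-- def sum_0(numbers):
--     it = reversed(numbers)
--     for v in it:           # phase 1: scan right-to-left to the last zero
--         if v == 0: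
--             break
--     else:
--         return 0           # no zero at all
--     total = 0
--     for v in it:           # phase 2: sum until the second-to-last zero
--         if v == 0:
--             return total
--         total += v
--     return 0               # only one zero
-- ===== Notes on version B (the rewrite author's own statement) =====
-- stated objective: alternative
-- what changed: B scans the list right-to-left in two phases over a shared reversed iterator with an early exit -- skip to the last zero, then accumulate until the next zero -- computing no indices and no slices, where A does a full left-to-right index scan tracking the last two zero positions and then sums a slice between them.
import Mathlib
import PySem

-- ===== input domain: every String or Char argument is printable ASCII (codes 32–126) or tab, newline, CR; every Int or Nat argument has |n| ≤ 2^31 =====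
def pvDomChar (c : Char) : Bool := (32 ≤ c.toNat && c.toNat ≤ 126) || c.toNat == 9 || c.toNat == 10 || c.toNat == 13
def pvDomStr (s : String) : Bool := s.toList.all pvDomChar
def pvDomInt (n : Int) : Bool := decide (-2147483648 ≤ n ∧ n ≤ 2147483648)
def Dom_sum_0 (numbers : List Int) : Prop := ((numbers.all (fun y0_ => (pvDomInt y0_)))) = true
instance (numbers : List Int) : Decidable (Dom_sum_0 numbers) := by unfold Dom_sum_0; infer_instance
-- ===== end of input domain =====

-- B replaces A's indexed left-to-right scan (tracking the last two zero positions,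
-- then summing a slice) by an index-free right-to-left two-phase scan with early exit
-- (objective: alternative).

-- ===== PORT A =====
-- A's loop: for i in range(len(numbers)): if numbers[i] == 0: shift (last_index, last_index_2)
def sum_0_loop (numbers : List Int) : Int × Int :=
  (PySem.List.pyRange 0 (numbers.length : Int) 1).foldl
    (fun (p : Int × Int) i => if PySem.List.pyGetD numbers i 0 = 0 then (i, p.1) else p)
    (-1, -1)

def sum_0 (numbers : List Int) : Int :=
  if (sum_0_loop numbers).1 - (sum_0_loop numbers).2 = 1 then 0
  else if (sum_0_loop numbers).1 ≠ -1 ∧ (sum_0_loop numbers).2 ≠ -1 then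
    (PySem.List.slice numbers (some ((sum_0_loop numbers).2 + 1))
      (some (sum_0_loop numbers).1)).sum
  else 0

-- ===== PORT B =====
-- phase 2: 'total = 0; for v in it: if v == 0: return total; total += v; return 0'
def sum_0_phase2 (l : List Int) (total : Int) : Int :=
  match l with
  | [] => 0
  | v :: rest => if v = 0 then total else sum_0_phase2 rest (total + v)

-- phase 1: 'for v in it: if v == 0: break' then hand the rest of the iterator to phase 2
def sum_0_phase1 (l : List Int) : Int :=
  match l with
  | [] => 0
  | v :: rest => if v = 0 then sum_0_phase2 rest 0 else sum_0_phase1 rest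

def sum_0_alt (numbers : List Int) : Int := sum_0_phase1 numbers.reverse

-- ===== PRECONDITION & SPEC =====
def Spec_sum_0 (numbers : List Int) (out : Int) : Prop := out = sum_0_alt numbers
instance (numbers : List Int) (out : Int) : Decidable (Spec_sum_0 numbers out) := by unfold Spec_sum_0; infer_instance

-- ===== CLAIM (what is proved, stated in full; the proofs are below) =====
def Claim_equal_sum_0 : Prop := ∀ (numbers : List Int), Dom_sum_0 numbers → Spec_sum_0 numbers (sum_0 numbers)

-- ===== LEMMAS AND PROOFS =====

-- A's loop step / the same step over an enumerate entry
def pvStepA (full : List Int) (p : Int × Int) (i : Int) : Int × Int :=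
  if PySem.List.pyGetD full i 0 = 0 then (i, p.1) else p

def pvStepB (p : Int × Int) (e : Int × Int) : Int × Int :=
  if e.2 = 0 then (e.1, p.1) else p

-- zero positions of the list (proof-side characterisation of A's loop)
def pvZeros (numbers : List Int) : List Int :=
  ((PySem.List.enumerate numbers 0).filter (fun p => p.2 == 0)).map (·.1)

-- A's index loop over pyRange equals the same fold over enumerate of the suffix
theorem pv_bridge (xs : List Int) : ∀ (pre : List Int) (acc : Int × Int),
    (PySem.List.pyRange (pre.length : Int) ((pre.length : Int) + (xs.length : Int)) 1).foldl
        (pvStepA (pre ++ xs)) acc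
      = (PySem.List.enumerate xs (pre.length : Int)).foldl pvStepB acc := by
  induction xs with
  | nil =>
      intro pre acc
      simp only [List.length_nil, Nat.cast_zero, add_zero, List.append_nil,
        PySem.List.enumerate_nil, List.foldl_nil]
      rw [PySem.List.pyRange_one_eq_nil (le_refl _)]
      rfl
  | cons x xs ih =>
      intro pre acc
      have hlt : (pre.length : Int) < (pre.length : Int) + ((x :: xs).length : Int) := by
        simp only [List.length_cons]; push_cast; omega
      rw [PySem.List.pyRange_one_cons hlt]
      rw [List.foldl_cons, PySem.List.enumerate_cons, List.foldl_cons]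
      have hget : PySem.List.pyGetD (pre ++ x :: xs) (pre.length : Int) 0 = x := by
        rw [PySem.List.pyGetD_natCast]
        simp [List.getD_eq_getElem?_getD]
      have hA : pvStepA (pre ++ x :: xs) acc (pre.length : Int) = pvStepB acc ((pre.length : Int), x) := by
        simp [pvStepA, pvStepB, hget]
      rw [hA]
      have h := ih (pre ++ [x]) (pvStepB acc ((pre.length : Int), x))
      simp only [List.length_append, List.length_cons, List.length_nil] at h ⊢
      rw [show pre ++ [x] ++ xs = pre ++ x :: xs by simp] at h
      push_cast at h ⊢
      ring_nf at h ⊢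
      exact h

-- top-two-from-the-right of the zero-position list (proof helper)
def pvTop2 (l : List Int) (acc : Int × Int) : Int × Int :=
  match l with
  | [] => acc
  | [a] => (a, acc.1)
  | a :: b :: _ => (a, b)

-- the enumerate fold computes pvTop2 of the reversed zero-position list
theorem pv_char (xs : List Int) : ∀ (s : Int) (acc : Int × Int),
    (PySem.List.enumerate xs s).foldl pvStepB acc
      = pvTop2 ((((PySem.List.enumerate xs s).filter (fun p => p.2 == 0)).map (·.1)).reverse) acc := by
  induction xs with
  | nil => intro s acc; simp [PySem.List.enumerate_nil, pvTop2]
  | cons x xs ih =>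
      intro s acc
      rw [PySem.List.enumerate_cons, List.foldl_cons]
      by_cases hx : x = 0
      · have hstep : pvStepB acc (s, x) = (s, acc.1) := by simp [pvStepB, hx]
        rw [hstep, ih (s + 1) (s, acc.1)]
        simp only [List.filter_cons, hx]
        simp only [beq_self_eq_true, if_pos, List.map_cons, List.reverse_cons]
        set t := (((PySem.List.enumerate xs (s + 1)).filter (fun p => p.2 == 0)).map (·.1)).reverse with ht
        match t with
        | [] => simp [pvTop2]
        | [a] => simp [pvTop2]
        | a :: b :: rest => simp [pvTop2]
      · have hstep : pvStepB acc (s, x) = acc := by simp [pvStepB, hx]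
        rw [hstep, ih (s + 1) acc]
        simp [hx]

-- A's loop state is pvTop2 of the reversed zero-position list
theorem pv_loop_char (numbers : List Int) :
    sum_0_loop numbers = pvTop2 ((pvZeros numbers).reverse) (-1, -1) := by
  unfold sum_0_loop pvZeros
  have hb := pv_bridge numbers [] (-1, -1)
  simp only [List.length_nil, Nat.cast_zero, List.nil_append, zero_add] at hb
  rw [show (fun (p : Int × Int) i => if PySem.List.pyGetD numbers i 0 = 0 then (i, p.1) else p)
        = pvStepA numbers from rfl]
  rw [hb, pv_char]

-- enumerate distributes over append
theorem pv_enum_append (xs ys : List Int) : ∀ s : Int,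
    PySem.List.enumerate (xs ++ ys) s
      = PySem.List.enumerate xs s ++ PySem.List.enumerate ys (s + (xs.length : Int)) := by
  induction xs with
  | nil => intro s; simp [PySem.List.enumerate_nil]
  | cons x xs ih =>
      intro s
      simp only [List.cons_append, PySem.List.enumerate_cons, ih (s + 1), List.length_cons]
      push_cast; ring_nf

-- a zero-free block contributes nothing to pvZeros
theorem pv_zeros_none (xs : List Int) (h : (0 : Int) ∉ xs) : ∀ s : Int,
    (PySem.List.enumerate xs s).filter (fun p => p.2 == 0) = [] := by
  induction xs with
  | nil => intro s; simp [PySem.List.enumerate_nil]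
  | cons x xs ih =>
      intro s
      have hx : x ≠ 0 := fun hx => h (hx ▸ List.mem_cons_self)
      rw [PySem.List.enumerate_cons]
      simp only [List.filter_cons]
      have hxb : ((x == (0:Int))) = false := by simp [hx]
      simp only [hxb, Bool.false_eq_true]
      exact ih (fun hm => h (List.mem_cons_of_mem _ hm)) (s + 1)

-- every list is zero-free or splits at its LAST zero
theorem pv_split (xs : List Int) :
    (0 : Int) ∉ xs ∨ ∃ u t, xs = u ++ 0 :: t ∧ (0 : Int) ∉ t := by
  induction xs with
  | nil => exact Or.inl (by simp)
  | cons x xs ih =>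
      rcases ih with h | ⟨u, t, he, ht⟩
      · by_cases hx : x = (0 : Int)
        · exact Or.inr ⟨[], xs, by simp [hx], h⟩
        · refine Or.inl (fun hmem => ?_)
          rcases List.mem_cons.mp hmem with he | hm
          · exact hx he.symm
          · exact h hm
      · exact Or.inr ⟨x :: u, t, by simp [he], ht⟩

-- B-side: a zero-free list gives 0 in either phase
theorem pv_phase2_none (l : List Int) (h : (0 : Int) ∉ l) : ∀ acc, sum_0_phase2 l acc = 0 := by
  induction l with
  | nil => intro acc; rfl
  | cons v rest ih =>
      intro acc
      have hv : v ≠ 0 := fun hv => h (hv ▸ List.mem_cons_self)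
      simp only [sum_0_phase2, if_neg hv]
      exact ih (fun hm => h (List.mem_cons_of_mem _ hm)) _

theorem pv_phase1_none (l : List Int) (h : (0 : Int) ∉ l) : sum_0_phase1 l = 0 := by
  induction l with
  | nil => rfl
  | cons v rest ih =>
      have hv : v ≠ 0 := fun hv => h (hv ▸ List.mem_cons_self)
      simp only [sum_0_phase1, if_neg hv]
      exact ih (fun hm => h (List.mem_cons_of_mem _ hm))

-- B-side: phases skip / accumulate a zero-free prefix
theorem pv_phase1_skip (s : List Int) (h : (0 : Int) ∉ s) (l : List Int) :
    sum_0_phase1 (s ++ l) = sum_0_phase1 l := by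
  induction s with
  | nil => rfl
  | cons v rest ih =>
      have hv : v ≠ 0 := fun hv => h (hv ▸ List.mem_cons_self)
      simp only [List.cons_append, sum_0_phase1, if_neg hv]
      exact ih (fun hm => h (List.mem_cons_of_mem _ hm))

theorem pv_phase2_skip (s : List Int) (h : (0 : Int) ∉ s) : ∀ (l : List Int) (acc : Int),
    sum_0_phase2 (s ++ l) acc = sum_0_phase2 l (acc + s.sum) := by
  induction s with
  | nil => intro l acc; simp
  | cons v rest ih =>
      intro l acc
      have hv : v ≠ 0 := fun hv => h (hv ▸ List.mem_cons_self)
      simp only [List.cons_append, sum_0_phase2, if_neg hv]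
      rw [ih (fun hm => h (List.mem_cons_of_mem _ hm)) l (acc + v)]
      simp only [List.sum_cons]; ring_nf

theorem sum_0_eq_alt (numbers : List Int) : sum_0 numbers = sum_0_alt numbers := by
  rcases pv_split numbers with h0 | ⟨u, t, he, ht⟩
  · -- no zero at all: both sides 0
    have hz : pvZeros numbers = [] := by
      unfold pvZeros; rw [pv_zeros_none numbers h0 0]; rfl
    unfold sum_0 sum_0_alt
    rw [pv_loop_char, hz]
    simp only [List.reverse_nil, pvTop2]
    norm_num
    exact (pv_phase1_none _ (by simpa using h0)).symm
  · rcases pv_split u with hu0 | ⟨u', m, heu, hm⟩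
    · -- exactly one zero: numbers = u ++ 0 :: t, u and t zero-free; both sides 0
      subst he
      have hz : pvZeros (u ++ 0 :: t) = [(u.length : Int)] := by
        unfold pvZeros
        rw [pv_enum_append, List.filter_append, pv_zeros_none u hu0 0,
          PySem.List.enumerate_cons]
        simp only [List.filter_cons]
        simp [pv_zeros_none t ht]
      unfold sum_0 sum_0_alt
      rw [pv_loop_char, hz]
      simp only [List.reverse_cons, List.reverse_nil, List.nil_append, pvTop2]
      have hB : sum_0_phase1 (u ++ 0 :: t).reverse = 0 := by
        have hrev : (u ++ 0 :: t).reverse = t.reverse ++ 0 :: u.reverse := by simp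
        rw [hrev, pv_phase1_skip _ (by simpa using ht)]
        have h1 : sum_0_phase1 ((0 : Int) :: u.reverse) = sum_0_phase2 u.reverse 0 := by
          simp [sum_0_phase1]
        rw [h1]
        exact pv_phase2_none _ (by simpa using hu0) 0
      rw [hB]
      split_ifs with h1 h2
      · rfl
      · exact absurd rfl h2.2
      · rfl
    · -- at least two zeros: numbers = u' ++ 0 :: m ++ 0 :: t, m and t zero-free
      subst heu; subst he
      have hz : pvZeros ((u' ++ 0 :: m) ++ 0 :: t)
          = pvZeros u' ++ [(u'.length : Int), (u'.length : Int) + (m.length : Int) + 1] := by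
        unfold pvZeros
        rw [show (u' ++ 0 :: m) ++ 0 :: t = u' ++ 0 :: (m ++ 0 :: t) from by simp]
        rw [pv_enum_append, List.filter_append, List.map_append]
        congr 1
        rw [PySem.List.enumerate_cons, pv_enum_append, PySem.List.enumerate_cons]
        simp only [List.filter_cons, List.filter_append, pv_zeros_none m hm,
          pv_zeros_none t ht]
        simp only [zero_add, beq_self_eq_true, if_pos, List.nil_append, List.map_cons,
          List.map_nil]
        norm_num
        omega
      set a : Int := (u'.length : Int) + (m.length : Int) + 1 with ha
      have hz2 : ((pvZeros ((u' ++ 0 :: m) ++ 0 :: t)).reverse)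
          = a :: (u'.length : Int) :: (pvZeros u').reverse := by
        rw [hz]; simp
      unfold sum_0 sum_0_alt
      rw [pv_loop_char, hz2]
      simp only [pvTop2]
      -- B side value: m.sum
      have hB : sum_0_phase1 ((u' ++ 0 :: m) ++ 0 :: t).reverse = m.sum := by
        have hrev : ((u' ++ 0 :: m) ++ 0 :: t).reverse
            = t.reverse ++ 0 :: (m.reverse ++ 0 :: u'.reverse) := by simp
        rw [hrev, pv_phase1_skip _ (by simpa using ht)]
        have h1 : sum_0_phase1 ((0 : Int) :: (m.reverse ++ 0 :: u'.reverse))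
            = sum_0_phase2 (m.reverse ++ 0 :: u'.reverse) 0 := by simp [sum_0_phase1]
        rw [h1, pv_phase2_skip _ (by simpa using hm)]
        have h2 : sum_0_phase2 ((0 : Int) :: u'.reverse) (0 + m.reverse.sum)
            = 0 + m.reverse.sum := by simp [sum_0_phase2]
        rw [h2]
        simp
      rw [hB]
      by_cases hadj : a - (u'.length : Int) = 1
      · -- adjacent zeros: m = [], A returns 0 = m.sum
        have hm0 : m = [] := by
          have : (m.length : Int) = 0 := by omega
          exact List.eq_nil_of_length_eq_zero (by exact_mod_cast this)
        rw [if_pos hadj, hm0]; rfl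
      · rw [if_neg hadj, if_pos ⟨by omega, by omega⟩]
        -- slice ((u'.length)+1) a of u' ++ 0 :: m ++ 0 :: t is m
        have hsl : PySem.List.slice ((u' ++ 0 :: m) ++ 0 :: t)
            (some ((u'.length : Int) + 1)) (some a) = m := by
          rw [PySem.List.slice_toNat (xs := (u' ++ 0 :: m) ++ 0 :: t)
            (show (0:Int) ≤ (u'.length : Int) + 1 by omega) (show (0:Int) ≤ a by omega)]
          have h1 : ((u'.length : Int) + 1).toNat = u'.length + 1 := by omega
          have h2 : a.toNat = u'.length + m.length + 1 := by omega
          rw [h1, h2]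
          rw [show (u' ++ 0 :: m) ++ 0 :: t = u' ++ 0 :: (m ++ 0 :: t) from by simp]
          rw [show u'.length + 1 = (u' ++ [(0:Int)]).length from by simp]
          rw [show u' ++ 0 :: (m ++ 0 :: t) = (u' ++ [0]) ++ (m ++ 0 :: t) from by simp]
          rw [List.drop_left,
            show u'.length + m.length + 1 - (u' ++ [(0:Int)]).length = m.length from by simp]
          simp
        rw [hsl]

-- ===== VERDICT (by name: the statement is the Claim_ definition above) =====
theorem sum_0_spec : Claim_equal_sum_0 := by
  intro numbers _
  unfold Spec_sum_0
  exact sum_0_eq_alt numbers
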